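-- pv_equiv track=rewrite | github.com/GoshkaEgoshka/IndividualProjectPythonTasks | models/fibonacci_series.py | character_limit
-- ===== SOURCE A (Python) =====
-- def fibonacci(number: int):
--     fibonacci_1 = 0
--     fibonacci_2 = 1
--     if number == 1:
--         return 0
--     else:
--         for i in range(number - 1):
--             fibonacci_sum = fibonacci_1 + fibonacci_2
--             fibonacci_2 = fibonacci_1
--             fibonacci_1 = fibonacci_sum
--         return fibonacci_sum
--
-- def character_limit(limit: int) -> list:
--     fibonacci_series_list = list()
--     number = 0
--
--     while True:
--         number = number + 1
--         buff = len(str(fibonacci(number)))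
--
--         if buff < limit:
--             continue
--         elif buff == limit:
--             fibonacci_series_list.append(fibonacci(number))
--         else:
--             break
--     return fibonacci_series_list
-- ===== SOURCE B (Python) =====
-- def character_limit(limit: int) -> list:
--     result = []
--     a, b = 0, 1
--     while True:
--         digits = len(str(a))
--         if digits > limit:
--             break
--         if digits == limit:
--             result.append(a)
--         a, b = b, a + b
--     return result
-- ===== Notes on version B (the rewrite author's own statement) =====
-- stated objective: faster
-- what changed: B generates the Fibonacci sequence once incrementally (carrying the pair a,b), instead of A's calling fibonacci(number) from scratch (twice) for every index, removing a whole linear pass per term; intended as faster (a timing run measured ~27x at the largest size both finished).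
import Mathlib
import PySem

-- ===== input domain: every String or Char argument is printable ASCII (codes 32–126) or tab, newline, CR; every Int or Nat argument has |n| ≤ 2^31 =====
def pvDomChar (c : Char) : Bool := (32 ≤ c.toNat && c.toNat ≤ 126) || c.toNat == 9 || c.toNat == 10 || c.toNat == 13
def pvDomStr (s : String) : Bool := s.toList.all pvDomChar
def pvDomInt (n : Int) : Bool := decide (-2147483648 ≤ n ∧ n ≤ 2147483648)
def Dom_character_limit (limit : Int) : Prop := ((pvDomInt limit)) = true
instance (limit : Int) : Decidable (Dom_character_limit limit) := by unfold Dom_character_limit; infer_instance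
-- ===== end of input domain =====

-- B replaces A's per-term from-scratch fibonacci(number) recomputation (called twice per
-- appended term) with one incremental pass carrying the Fibonacci pair (intended as faster;
-- a timing run measured ~27x at the largest size both finished).
-- Both Pythons are 'while True' loops that terminate because Fibonacci digit counts grow;
-- the ports make this total with a fuel of (5*limit+20).toNat iterations, which always
-- exceeds the ~4.79*limit+3 iterations the loops actually perform.

-- ===== PORT A =====
-- A's fibonacci helper: for number ≤ 0 Python raises NameError (fibonacci_sum unbound);
-- character_limit only calls it with number ≥ 1, so the port returns 0 there (unreachable).
def fibonacciA (number : Int) : Int :=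
  if number == 1 then 0
  else
    -- state (fibonacci_1, fibonacci_2, fibonacci_sum), loop over range(number - 1)
    let st := (PySem.List.pyRange 0 (number - 1) 1).foldl
      (fun (st : Int × Int × Int) _ => (st.1 + st.2.1, st.1, st.1 + st.2.1)) (0, 1, 0)
    st.2.2

-- the while-True loop of A, made total by fuel (Python never exhausts it)
def chLoopA (limit : Int) : Nat → Int → List Int → List Int
  | 0, _, acc => acc
  | fuel + 1, number, acc =>
    let number := number + 1
    let buff : Int := PySem.Str.len (PySem.Int.toStr (fibonacciA number))
    if buff < limit then chLoopA limit fuel number acc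
    else if buff == limit then chLoopA limit fuel number (acc ++ [fibonacciA number])
    else acc

def character_limit (limit : Int) : List Int :=
  chLoopA limit (5 * limit + 20).toNat 0 []

-- ===== PORT B =====
-- the while-True loop of B, carrying the Fibonacci pair (a, b); same fuel device
def chLoopB (limit : Int) : Nat → Int → Int → List Int → List Int
  | 0, _, _, acc => acc
  | fuel + 1, a, b, acc =>
    let digits : Int := PySem.Str.len (PySem.Int.toStr a)
    if limit < digits then acc
    else if digits == limit then chLoopB limit fuel b (a + b) (acc ++ [a])
    else chLoopB limit fuel b (a + b) acc

def character_limit_alt (limit : Int) : List Int :=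
  chLoopB limit (5 * limit + 20).toNat 0 1 []

-- ===== PRECONDITION & SPEC =====
def Spec_character_limit (limit : Int) (out : List Int) : Prop := out = character_limit_alt limit
instance (limit : Int) (out : List Int) : Decidable (Spec_character_limit limit out) := by unfold Spec_character_limit; infer_instance

-- ===== CLAIM (what is proved, stated in full; the proofs are below) =====
def Claim_equal_character_limit : Prop := ∀ (limit : Int), Dom_character_limit limit → Spec_character_limit limit (character_limit limit)

-- ===== LEMMAS AND PROOFS =====

-- a fold whose body ignores the list elements is an iterate of its length
lemma foldl_const_iterate {α β : Type} (g : α → α) (l : List β) (init : α) :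
    l.foldl (fun s _ => g s) init = g^[l.length] init := by
  induction l generalizing init with
  | nil => rfl
  | cons x xs ih => simp [List.foldl_cons, ih, Function.iterate_succ_apply]

-- the state of A's inner loop after k+1 steps, in terms of Nat.fib
lemma fibState_iterate (k : Nat) :
    (fun (st : Int × Int × Int) => (st.1 + st.2.1, st.1, st.1 + st.2.1))^[k + 1] (0, 1, 0)
      = ((Nat.fib (k + 1) : Int), (Nat.fib k : Int), (Nat.fib (k + 1) : Int)) := by
  induction k with
  | zero => simp
  | succ k ih =>
    rw [Function.iterate_succ_apply', ih]
    simp [Nat.fib_add_two]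
    ring

-- A's fibonacci helper computes Nat.fib
lemma fibonacciA_eq (k : Nat) : fibonacciA ((k + 1 : Nat) : Int) = (Nat.fib k : Int) := by
  cases k with
  | zero => norm_num [fibonacciA]
  | succ k =>
    unfold fibonacciA
    rw [if_neg (by simp; omega)]
    rw [show ((k + 1 + 1 : Nat) : Int) - 1 = ((k + 1 : Nat) : Int) by push_cast; ring]
    rw [foldl_const_iterate, PySem.List.length_pyRange_one]
    simp only [Int.sub_zero, Int.toNat_natCast]
    rw [fibState_iterate]

-- both loops track the same Fibonacci value: A's counter k corresponds to B's pair (fib k, fib (k+1))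
lemma loops_eq (limit : Int) (fuel : Nat) : ∀ (k : Nat) (acc : List Int),
    chLoopA limit fuel (k : Int) acc
      = chLoopB limit fuel (Nat.fib k : Int) (Nat.fib (k + 1) : Int) acc := by
  induction fuel with
  | zero => intro k acc; rfl
  | succ fuel ih =>
    intro k acc
    rw [chLoopA, chLoopB]
    simp only [show (k : Int) + 1 = ((k + 1 : Nat) : Int) by push_cast; ring]
    rw [fibonacciA_eq k]
    have hfib : (Nat.fib k : Int) + (Nat.fib (k + 1) : Int) = (Nat.fib (k + 2) : Int) := by
      rw [Nat.fib_add_two]; push_cast; ring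
    set d : Int := PySem.Str.len (PySem.Int.toStr (Nat.fib k : Int)) with hd
    rcases lt_trichotomy d limit with h | h | h
    · rw [if_pos h, if_neg (by omega), if_neg (by simp; omega), ih (k + 1), hfib]
    · rw [if_neg (by omega), if_pos (by simp [h]), if_neg (by omega), if_pos (by simp [h]),
        ih (k + 1), hfib]
    · rw [if_neg (by omega), if_neg (by simp; omega), if_pos (by omega)]

-- ===== VERDICT (by name: the statement is the Claim_ definition above) =====
theorem character_limit_spec : Claim_equal_character_limit := by
  intro limit _
  unfold Spec_character_limit character_limit character_limit_alt
  have := loops_eq limit (5 * limit + 20).toNat 0 []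
  simpa using this
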